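-- pv_equiv track=rewrite | github.com/q11N9/CTF_Writeups | Năm 2/Kì 2 đợt 2/ThuatToanATTT/.vscode/Phần 1/bai7.py | emirpNumber
-- ===== SOURCE A (Python) =====
-- def isPrime(n):
--     if n < 2 :
--         return 0
--     if n == 2:
--         return 1
--     i = 2
--     while i * i <= n:
--         if n % i == 0:
--             return 0
--         i += 1
--     return 1
--
-- def reverseNumber(n):
--     reversed_n = 0
--     while n != 0:
--         reversed_n = reversed_n * 10 + n % 10
--         n = int(n / 10)
--     return reversed_n
--
-- def emirpNumber(n):
--     sieve = [1] * n
--     sieve[0] = sieve[1] = 0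
--     emirp = []
--     for i in range(2, n):
--         if sieve[i] == 1:
--             if isPrime(reverseNumber(i)) == 1:
--                 emirp.append(i)
--             j = 2
--             while i * j < n:
--                 sieve[i*j] = 0
--                 j += 1
--     return emirp
-- ===== SOURCE B (Python) =====
-- def emirpNumber(n):
--     # One sieve of Eratosthenes big enough to cover every digit-reversal of a
--     # number below n, so the reversed-value primality test is an O(1) lookup.
--     limit = 10
--     while limit < n:
--         limit *= 10
--     comp = bytearray(limit)  # comp[k] == 1  <=>  k is 0, 1 or composite
--     comp[0] = comp[1] = 1
--     for p in range(2, limit):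
--         if not comp[p]:
--             for m in range(p * p, limit, p):
--                 comp[m] = 1
--     res = []
--     for i in range(2, n):
--         if not comp[i]:
--             r = 0
--             m = i
--             while m:
--                 r = 10 * r + m % 10
--                 m //= 10
--             if not comp[r]:
--                 res.append(i)
--     return res
-- ===== Notes on version B (the rewrite author's own statement) =====
-- stated objective: faster
-- what changed: A tests the primality of each reversed value by trial division up to its square root; B builds a single sieve of Eratosthenes up to the next power of 10 >= n (which covers every digit-reversal of a number below n), so both primality tests become O(1) table lookups; intended as faster (timing runs measured ~3-3.6x at the largest generated size, less consistently at smaller sizes).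
import Mathlib
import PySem

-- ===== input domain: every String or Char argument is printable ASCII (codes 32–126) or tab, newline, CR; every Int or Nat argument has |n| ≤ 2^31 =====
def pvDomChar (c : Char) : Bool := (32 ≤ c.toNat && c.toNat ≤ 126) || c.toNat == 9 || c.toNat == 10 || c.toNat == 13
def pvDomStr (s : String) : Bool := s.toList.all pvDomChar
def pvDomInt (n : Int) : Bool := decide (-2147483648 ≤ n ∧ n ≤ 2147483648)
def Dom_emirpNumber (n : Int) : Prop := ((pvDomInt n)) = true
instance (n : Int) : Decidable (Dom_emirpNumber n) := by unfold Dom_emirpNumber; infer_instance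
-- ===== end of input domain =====

-- B replaces A's per-prime trial-division test of the reversed value by one sieve of
-- Eratosthenes extended to the next power of 10 ≥ n, making every primality test an O(1)
-- lookup; intended as faster (timing runs measured B ~3-3.6x faster than A at the largest
-- generated size, less consistently at smaller sizes).

-- ===== PORT A =====
-- trial-division loop of isPrime: 'while i * i <= n'
def pvIsPrimeAux (n i : Int) : Int :=
  if h : i * i ≤ n then
    (if PySem.Int.mod n i = 0 then 0 else pvIsPrimeAux n (i + 1))
  else 1
termination_by (n + 1 - i).toNat
decreasing_by
  have hi : i ≤ n := by nlinarith [mul_self_nonneg i, mul_self_nonneg (i - 1)]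
  omega

def pvIsPrime (n : Int) : Int :=
  if n < 2 then 0
  else if n = 2 then 1
  else pvIsPrimeAux n 2

-- reverseNumber; 'int(n / 10)' is PySem.Int.truncdiv n 10 (exact: |n| ≤ 2^31 < 2^53)
def pvRevA (n r : Int) : Int :=
  if n = 0 then r
  else pvRevA (PySem.Int.truncdiv n 10) (r * 10 + PySem.Int.mod n 10)
termination_by n.natAbs
decreasing_by
  have h10 : n.natAbs / 10 < n.natAbs := Nat.div_lt_self (by omega) (by norm_num)
  simpa [PySem.Int.truncdiv, Int.natAbs_tdiv] using h10

-- inner 'while i * j < n: sieve[i*j] = 0'; '2 ≤ i' is a totality guard, true at every call site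
def pvMark (sieve : Array Int) (n i j : Int) : Array Int :=
  if h : 2 ≤ i ∧ i * j < n then
    pvMark (sieve.setIfInBounds (i * j).toNat 0) n i (j + 1)
  else sieve
termination_by (n - i * j).toNat
decreasing_by
  have : i * (j + 1) = i * j + i := by ring
  omega

def pvStepA (n : Int) (st : Array Int × List Int) (i : Int) : Array Int × List Int :=
  if st.1.getD i.toNat 0 = 1 then
    (pvMark st.1 n i 2,
     if pvIsPrime (pvRevA i 0) = 1 then st.2 ++ [i] else st.2)
  else st

def emirpNumber (n : Int) : List Int :=
  let sieve := ((Array.replicate n.toNat (1 : Int)).setIfInBounds 0 0).setIfInBounds 1 0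
  ((PySem.List.pyRange 2 n 1).foldl (pvStepA n) (sieve, [])).2

-- ===== PORT B =====
-- 'while limit < n: limit *= 10'; '1 ≤ limit' is a totality guard, true at every call site
def pvLimit (limit n : Int) : Int :=
  if h : 1 ≤ limit ∧ limit < n then pvLimit (limit * 10) n else limit
termination_by (n - limit).toNat
decreasing_by
  have _h9 : 1 * 9 ≤ limit * 9 := by nlinarith
  have : limit * 10 = limit + limit * 9 := by ring
  omega

-- 'if not comp[p]: for m in range(p*p, limit, p): comp[m] = 1'
def pvStepB (limit : Int) (comp : Array Int) (p : Int) : Array Int :=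
  if comp.getD p.toNat 1 = 0 then
    (PySem.List.pyRange (p * p) limit p).foldl (fun c m => c.setIfInBounds m.toNat 1) comp
  else comp

-- 'while m: r = 10*r + m % 10; m //= 10'; '1 ≤ m' is a totality guard ≡ 'm ≠ 0'
-- on the nonnegative m this is called with
def pvRevB (m r : Int) : Int :=
  if h : 1 ≤ m then pvRevB (PySem.Int.floordiv m 10) (10 * r + PySem.Int.mod m 10)
  else r
termination_by m.toNat
decreasing_by
  rw [PySem.Int.floordiv_eq_ediv_of_pos (by omega)]
  omega

def emirpNumber_alt (n : Int) : List Int :=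
  let limit := pvLimit 10 n
  let comp0 := ((Array.replicate limit.toNat (0 : Int)).setIfInBounds 0 1).setIfInBounds 1 1
  let comp := (PySem.List.pyRange 2 limit 1).foldl (pvStepB limit) comp0
  (PySem.List.pyRange 2 n 1).foldl
    (fun res i =>
      if comp.getD i.toNat 1 = 0 then
        (if comp.getD (pvRevB i 0).toNat 1 = 0 then res ++ [i] else res)
      else res) []

-- ===== PRECONDITION & SPEC =====
-- Pre_ excludes exactly the inputs on which A raises IndexError: 'sieve[0] = sieve[1] = 0'
-- needs the freshly built sieve list to have at least two cells.
def Pre_emirpNumber (n : Int) : Prop := 2 ≤ n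
instance (n : Int) : Decidable (Pre_emirpNumber n) := by unfold Pre_emirpNumber; infer_instance

def pvWitness_emirpNumber : Int := (10)

def Spec_emirpNumber (n : Int) (out : List Int) : Prop := out = emirpNumber_alt n
instance (n : Int) (out : List Int) : Decidable (Spec_emirpNumber n out) := by unfold Spec_emirpNumber; infer_instance

-- ===== CLAIM (what is proved, stated in full; the proofs are below) =====
def Claim_equal_emirpNumber : Prop := ∀ (n : Int), Dom_emirpNumber n → Pre_emirpNumber n → Spec_emirpNumber n (emirpNumber n)

-- ===== LEMMAS AND PROOFS =====

-- the predicate both programs compute: i and its digit-reversal are prime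
def pvQ (x : Int) : Bool := decide (Nat.Prime x.toNat) && decide (Nat.Prime (pvRevB x 0).toNat)

-- ---- trial division (A's isPrime) ----
theorem pvIsPrimeAux_eq_one_iff (n : Int) (hn : 2 ≤ n) :
    ∀ i : Int, 2 ≤ i →
      (pvIsPrimeAux n i = 1 ↔ ∀ d : Int, i ≤ d → d * d ≤ n → ¬ d ∣ n) := by
  suffices h : ∀ m : Nat, ∀ i : Int, 2 ≤ i → (n + 1 - i).toNat = m →
      (pvIsPrimeAux n i = 1 ↔ ∀ d : Int, i ≤ d → d * d ≤ n → ¬ d ∣ n) by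
    intro i hi; exact h _ i hi rfl
  intro m
  induction m using Nat.strong_induction_on with
  | _ m ih =>
  intro i hi hm
  rw [pvIsPrimeAux]
  split_ifs with hsq hdvd
  · -- i * i ≤ n and n % i = 0 : returns 0
    rw [PySem.Int.mod_eq_zero_iff_dvd] at hdvd
    constructor
    · intro h0; exact absurd h0 (by norm_num)
    · intro hall; exact absurd hdvd (hall i le_rfl hsq)
  · -- i * i ≤ n and i does not divide n : recurse
    rw [PySem.Int.mod_eq_zero_iff_dvd] at hdvd
    have hin : i ≤ n := by nlinarith [mul_self_nonneg i, mul_self_nonneg (i - 1)]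
    have hrec := ih (n + 1 - (i + 1)).toNat (by omega) (i + 1) (by omega) rfl
    rw [hrec]
    constructor
    · intro hall d hd hdd
      rcases eq_or_lt_of_le hd with rfl | hlt
      · exact hdvd
      · exact hall d (by omega) hdd
    · intro hall d hd hdd
      exact hall d (by omega) hdd
  · -- i * i > n : returns 1, and there is no divisor d ≥ i with d * d ≤ n
    constructor
    · intro _ d hd hdd _
      have h1 : i * i ≤ d * d := by nlinarith
      omega
    · intro _; rfl

theorem prime_iff_no_small_divisor (m : Nat) (h2 : 2 ≤ m) :
    Nat.Prime m ↔ ∀ d : Nat, 2 ≤ d → d * d ≤ m → ¬ d ∣ m := by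
  rw [Nat.prime_def_le_sqrt]
  constructor
  · rintro ⟨-, h⟩ d hd hdd
    exact h d hd (by rwa [Nat.le_sqrt])
  · intro h
    exact ⟨h2, fun d hd hds => h d hd (by rwa [← Nat.le_sqrt])⟩

theorem pvIsPrime_eq_one_iff (n : Int) (h0 : 0 ≤ n) :
    (pvIsPrime n = 1 ↔ Nat.Prime n.toNat) := by
  obtain ⟨m, rfl⟩ : ∃ m : Nat, n = (m : Int) := ⟨n.toNat, (Int.toNat_of_nonneg h0).symm⟩
  rw [pvIsPrime, Int.toNat_natCast]
  split_ifs with h2 he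
  · constructor
    · intro h; exact absurd h (by norm_num)
    · intro hp; have := hp.two_le; omega
  · simp only [show m = 2 by exact_mod_cast he]
    simpa using Nat.prime_two
  · have hm2 : 2 ≤ m := by exact_mod_cast not_lt.mp h2
    rw [pvIsPrimeAux_eq_one_iff (m : Int) (by exact_mod_cast hm2) 2 (by norm_num),
      prime_iff_no_small_divisor m hm2]
    constructor
    · intro hall d hd hdd hdvd
      exact hall (d : Int) (by exact_mod_cast hd) (by exact_mod_cast hdd)
        (by exact_mod_cast hdvd)
    · intro hall d hd hdd hdvd
      have h2d : (0:Int) ≤ d := by omega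
      obtain ⟨dn, rfl⟩ : ∃ dn : Nat, d = (dn : Int) := ⟨d.toNat, (Int.toNat_of_nonneg h2d).symm⟩
      exact hall dn (by exact_mod_cast hd) (by exact_mod_cast hdd) (by exact_mod_cast hdvd)

-- ---- digit reversal ----
theorem pvRevA_eq_pvRevB (n : Int) (h : 0 ≤ n) : ∀ r : Int, pvRevA n r = pvRevB n r := by
  induction hn : n.toNat using Nat.strong_induction_on generalizing n with
  | _ m ih =>
  intro r
  by_cases h0 : n = 0
  · subst h0; rw [pvRevA, pvRevB]; simp
  · have hpos : 1 ≤ n := by omega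
    rw [pvRevA, pvRevB, if_neg h0, dif_pos hpos]
    have hdiv : PySem.Int.truncdiv n 10 = PySem.Int.floordiv n 10 := by
      rw [PySem.Int.floordiv_eq_ediv_of_pos (by norm_num)]
      simp [PySem.Int.truncdiv]
      exact Int.tdiv_eq_ediv_of_nonneg h
    have hd0 : 0 ≤ PySem.Int.floordiv n 10 := by
      rw [PySem.Int.floordiv_eq_ediv_of_pos (by norm_num)]; positivity
    have hlt : (PySem.Int.floordiv n 10).toNat < m := by
      rw [PySem.Int.floordiv_eq_ediv_of_pos (by norm_num)]
      omega
    rw [hdiv, ih _ hlt _ hd0 rfl, mul_comm]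

theorem pvRevB_nonneg (n r : Int) : 0 ≤ r → 0 ≤ pvRevB n r := by
  induction n, r using pvRevB.induct with
  | case1 m r h ih =>
      intro hr
      rw [pvRevB, dif_pos h]
      exact ih (by have := PySem.Int.mod_nonneg m (b := 10) (by norm_num); omega)
  | case2 m r h =>
      intro hr
      rw [pvRevB, dif_neg h]
      exact hr

theorem pvRevB_lt (d : Nat) : ∀ n r c : Int, 0 ≤ n → n < 10 ^ d → 0 ≤ r → r < c →
    pvRevB n r < c * 10 ^ d := by
  induction d with
  | zero =>
      intro n r c h0 h1 hr hc
      have hn0 : n = 0 := by simpa using by omega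
      rw [pvRevB, dif_neg (by omega)]
      simpa using hc
  | succ d ih =>
      intro n r c h0 h1 hr hc
      by_cases hpos : 1 ≤ n
      · rw [pvRevB, dif_pos hpos]
        have hm0 : 0 ≤ PySem.Int.mod n 10 := PySem.Int.mod_nonneg n (by norm_num)
        have hm1 : PySem.Int.mod n 10 < 10 := PySem.Int.mod_lt n (by norm_num)
        have hq0 : 0 ≤ PySem.Int.floordiv n 10 := by
          rw [PySem.Int.floordiv_eq_ediv_of_pos (by norm_num)]; positivity
        have hq1 : PySem.Int.floordiv n 10 < 10 ^ d := by
          rw [PySem.Int.floordiv_lt_iff_lt_mul (by norm_num)]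
          calc n < 10 ^ (d + 1) := h1
          _ = 10 ^ d * 10 := by ring
        have := ih (PySem.Int.floordiv n 10) (10 * r + PySem.Int.mod n 10) (10 * c)
          hq0 hq1 (by omega) (by omega)
        calc pvRevB (PySem.Int.floordiv n 10) (10 * r + PySem.Int.mod n 10)
            < 10 * c * 10 ^ d := this
          _ = c * 10 ^ (d + 1) := by ring
      · rw [pvRevB, dif_neg hpos]
        have h10 : (1 : Int) ≤ 10 ^ (d + 1) := one_le_pow₀ (by norm_num)
        nlinarith

-- ---- limit = a power of 10 at least n ----
theorem pvLimit_spec (n : Int) : ∀ L : Int, 1 ≤ L →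
    ∃ d : Nat, pvLimit L n = L * 10 ^ d ∧ n ≤ pvLimit L n := by
  suffices h : ∀ m : Nat, ∀ L : Int, 1 ≤ L → (n - L).toNat = m →
      ∃ d : Nat, pvLimit L n = L * 10 ^ d ∧ n ≤ pvLimit L n by
    intro L hL; exact h _ L hL rfl
  intro m
  induction m using Nat.strong_induction_on with
  | _ m ih =>
  intro L hL hm
  rw [pvLimit]
  split_ifs with h
  · have hdec : (n - L * 10).toNat < m := by
      have _h9 : 1 * 9 ≤ L * 9 := by nlinarith
      have : L * 10 = L + L * 9 := by ring
      omega
    obtain ⟨d, hd, hn⟩ := ih _ hdec (L * 10) (by omega) rfl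
    exact ⟨d + 1, by rw [hd]; ring, hn⟩
  · exact ⟨0, by ring, by omega⟩

-- ---- indexing helpers ----
theorem arrGetD_setN (xs : Array Int) (a : Nat) (k v d : Int)
    (ha2 : a < xs.size) (hk : 0 ≤ k) :
    (xs.setIfInBounds a v).getD k.toNat d =
      if k = (a : Int) then v else xs.getD k.toNat d := by
  by_cases hks : k.toNat < xs.size
  · have hks' : k.toNat < (xs.setIfInBounds a v).size := by
      rwa [Array.size_setIfInBounds]
    rw [show (xs.setIfInBounds a v).getD k.toNat d = (xs.setIfInBounds a v)[k.toNat]'hks' by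
      simp [Array.getD, Array.size_setIfInBounds, hks]]
    rw [Array.getElem_setIfInBounds hks]
    by_cases he : k = (a : Int)
    · rw [if_pos (by omega), if_pos he]
    · rw [if_neg (by omega), if_neg he]
      simp [Array.getD, hks]
  · have hne : k ≠ (a : Int) := by omega
    rw [if_neg hne]
    simp [Array.getD, Array.size_setIfInBounds, hks]

theorem arrGetD_set (xs : Array Int) (a k v d : Int) (ha : 0 ≤ a)
    (ha2 : a < (xs.size : Int)) (hk : 0 ≤ k) :
    (xs.setIfInBounds a.toNat v).getD k.toNat d =
      if k = a then v else xs.getD k.toNat d := by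
  have h := arrGetD_setN xs a.toNat k v d (by omega) hk
  rwa [Int.toNat_of_nonneg ha] at h

theorem arrGetD_replicate (m : Nat) (v d : Int) (k : Int) (hk : 0 ≤ k) (hkm : k < (m : Int)) :
    (Array.replicate m v).getD k.toNat d = v := by
  have hlt : k.toNat < m := by omega
  simp [Array.getD, Array.size_replicate, hlt]

-- ---- A's sieve ----
def predA (i k : Int) : Prop :=
  ∀ p : Int, 2 ≤ p → p < i → Nat.Prime p.toNat → p ∣ k → p = k

def invA (n i : Int) (s : Array Int) : Prop :=
  s.size = n.toNat ∧ ∀ k : Int, 0 ≤ k → k < n →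
    ((2 ≤ k ∧ predA i k) → s.getD k.toNat 0 = 1) ∧
    (¬(2 ≤ k ∧ predA i k) → s.getD k.toNat 0 = 0)

theorem exists_small_prime_factor (k : Int) (h2 : 2 ≤ k) (hnp : ¬ Nat.Prime k.toNat) :
    ∃ q : Int, 2 ≤ q ∧ Nat.Prime q.toNat ∧ q ∣ k ∧ q * q ≤ k ∧ q < k := by
  obtain ⟨m, rfl⟩ : ∃ m : Nat, k = (m : Int) := ⟨k.toNat, (Int.toNat_of_nonneg (by omega)).symm⟩
  rw [Int.toNat_natCast] at hnp
  have hm2 : 2 ≤ m := by exact_mod_cast h2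
  have hq : (m.minFac).Prime := Nat.minFac_prime (by omega)
  have hqd : m.minFac ∣ m := Nat.minFac_dvd m
  have hqq : m.minFac * m.minFac ≤ m := by
    have := Nat.minFac_sq_le_self (by omega) hnp
    rwa [pow_two] at this
  have hq2 : 2 ≤ m.minFac := hq.two_le
  refine ⟨(m.minFac : Int), by exact_mod_cast hq2, by simpa using hq, by exact_mod_cast hqd,
    by exact_mod_cast hqq, by exact_mod_cast (by nlinarith : m.minFac < m)⟩

theorem prime_int_dvd_eq (k p : Int) (hk : 2 ≤ k) (hp : Nat.Prime k.toNat)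
    (h2 : 2 ≤ p) (hd : p ∣ k) : p = k := by
  obtain ⟨m, rfl⟩ : ∃ m : Nat, k = (m : Int) := ⟨k.toNat, (Int.toNat_of_nonneg (by omega)).symm⟩
  obtain ⟨q, rfl⟩ : ∃ q : Nat, p = (q : Int) := ⟨p.toNat, (Int.toNat_of_nonneg (by omega)).symm⟩
  rw [Int.toNat_natCast] at hp
  have := hp.eq_one_or_self_of_dvd q (by exact_mod_cast hd)
  have hq2 : 2 ≤ q := by exact_mod_cast h2
  omega

theorem predA_self (i : Int) (hi : 2 ≤ i) : predA i i ↔ Nat.Prime i.toNat := by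
  constructor
  · intro h
    by_contra hnp
    obtain ⟨q, hq2, hqp, hqd, hqq, hqlt⟩ := exists_small_prime_factor i hi hnp
    have := h q hq2 hqlt hqp hqd
    omega
  · intro hp p hp2 hpi hppr hpd
    exact prime_int_dvd_eq i p hi hp hp2 hpd

theorem pvMark_length (n : Int) : ∀ i j : Int, ∀ sieve : Array Int,
    (pvMark sieve n i j).size = sieve.size := by
  suffices h : ∀ m : Nat, ∀ i j : Int, ∀ sieve : Array Int, (n - i * j).toNat = m →
      (pvMark sieve n i j).size = sieve.size by
    intro i j sieve; exact h _ i j sieve rfl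
  intro m
  induction m using Nat.strong_induction_on with
  | _ m ih =>
  intro i j sieve hm
  rw [pvMark]
  split_ifs with h
  · have hij : i * (j + 1) = i * j + i := by ring
    rw [ih (n - i * (j + 1)).toNat (by omega) i (j + 1) _ rfl]
    exact Array.size_setIfInBounds
  · rfl

theorem pvMark_get (n i : Int) (hi : 2 ≤ i) :
    ∀ j : Int, 2 ≤ j → ∀ sieve : Array Int, sieve.size = n.toNat → ∀ k : Int, 0 ≤ k → k < n →
      ((i ∣ k ∧ i * j ≤ k) → (pvMark sieve n i j).getD k.toNat 0 = 0) ∧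
      (¬(i ∣ k ∧ i * j ≤ k) →
        (pvMark sieve n i j).getD k.toNat 0 = sieve.getD k.toNat 0) := by
  suffices h : ∀ m : Nat, ∀ j : Int, 2 ≤ j → ∀ sieve : Array Int, (n - i * j).toNat = m →
      sieve.size = n.toNat → ∀ k : Int, 0 ≤ k → k < n →
      ((i ∣ k ∧ i * j ≤ k) → (pvMark sieve n i j).getD k.toNat 0 = 0) ∧
      (¬(i ∣ k ∧ i * j ≤ k) →
        (pvMark sieve n i j).getD k.toNat 0 = sieve.getD k.toNat 0) by
    intro j hj sieve hlen; exact h _ j hj sieve rfl hlen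
  intro m
  induction m using Nat.strong_induction_on with
  | _ m ih =>
  intro j hj sieve hm hlen k hk0 hkn
  have hij : i * (j + 1) = i * j + i := by ring
  rw [pvMark]
  split_ifs with h
  · -- marking step: sieve[i*j] := 0, recurse at j+1
    have hlen' : (sieve.setIfInBounds (i * j).toNat 0).size = n.toNat :=
      (Array.size_setIfInBounds).trans hlen
    have IH := ih (n - i * (j + 1)).toNat (by omega) (j + 1) (by omega)
      (sieve.setIfInBounds (i * j).toNat 0) rfl hlen' k hk0 hkn
    have hij0 : 0 ≤ i * j := by nlinarith
    have hijlen : i * j < ((sieve.size : Nat) : Int) := by rw [hlen]; omega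
    constructor
    · rintro ⟨hdvd, hle⟩
      by_cases hge : i * (j + 1) ≤ k
      · exact IH.1 ⟨hdvd, hge⟩
      · -- here k = i * j
        obtain ⟨c, rfl⟩ := hdvd
        have h1 : j ≤ c := le_of_mul_le_mul_left hle (by omega)
        have h2 : c < j + 1 := lt_of_mul_lt_mul_left (not_le.mp hge) (by omega)
        have hcj : c = j := by omega
        rw [hcj] at IH ⊢
        rw [IH.2 (by rintro ⟨-, hle'⟩; omega)]
        rw [arrGetD_set sieve (i * j) (i * j) 0 0 hij0 hijlen (hcj ▸ hk0)]
        simp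
    · intro hnm
      have hnm' : ¬(i ∣ k ∧ i * (j + 1) ≤ k) := by
        rintro ⟨hdvd, hle⟩; exact hnm ⟨hdvd, by omega⟩
      rw [IH.2 hnm']
      rw [arrGetD_set sieve (i * j) k 0 0 hij0 hijlen hk0]
      rw [if_neg (by rintro rfl; exact hnm ⟨dvd_mul_right i j, le_rfl⟩)]
  · -- loop does not run: n ≤ i * j
    have hnle : n ≤ i * j := by
      rcases not_and_or.mp h with h2 | h3
      · omega
      · omega
    exact ⟨fun ⟨_, hle⟩ => absurd hkn (by omega), fun _ => rfl⟩

theorem foldA_inv (n : Int) (hn : 2 ≤ n) :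
    ∀ t : Nat, 2 + (t : Int) ≤ n →
      invA n (2 + (t : Int))
        ((PySem.List.pyRange 2 (2 + (t : Int)) 1).foldl (pvStepA n)
          (((Array.replicate n.toNat (1 : Int)).setIfInBounds 0 0).setIfInBounds 1 0, [])).1 ∧
      ((PySem.List.pyRange 2 (2 + (t : Int)) 1).foldl (pvStepA n)
          (((Array.replicate n.toNat (1 : Int)).setIfInBounds 0 0).setIfInBounds 1 0, [])).2 =
        (PySem.List.pyRange 2 (2 + (t : Int)) 1).filter pvQ := by
  have hlen0 : ((((Array.replicate n.toNat (1 : Int)).setIfInBounds 0 0).setIfInBounds 1 0)).size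
      = n.toNat := by
    rw [Array.size_setIfInBounds, Array.size_setIfInBounds, Array.size_replicate]
  intro t
  induction t with
  | zero =>
      intro _
      have hnil : PySem.List.pyRange 2 (2 + ((0 : Nat) : Int)) 1 = [] :=
        PySem.List.pyRange_one_eq_nil (by norm_num)
      rw [hnil]
      rw [show ∀ st : Array Int × List Int, List.foldl (pvStepA n) st [] = st from fun _ => rfl]
      refine ⟨⟨hlen0, ?_⟩, rfl⟩
      intro k hk0 hkn
      have hk1 : ((((Array.replicate n.toNat (1 : Int)).setIfInBounds 0 0).setIfInBounds 1 0)).getD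
          k.toNat 0 =
          if k = 1 then 0 else if k = 0 then 0 else 1 := by
        rw [arrGetD_setN _ 1 k 0 0
          (by rw [Array.size_setIfInBounds, Array.size_replicate]; omega) hk0]
        simp only [Nat.cast_one]
        by_cases h1 : k = 1
        · rw [if_pos h1, if_pos h1]
        · rw [if_neg h1, if_neg h1,
            arrGetD_setN _ 0 k 0 0 (by rw [Array.size_replicate]; omega) hk0]
          simp only [Nat.cast_zero]
          by_cases h0 : k = 0
          · rw [if_pos h0, if_pos h0]
          · rw [if_neg h0, if_neg h0,
              arrGetD_replicate n.toNat 1 0 k hk0 (by omega)]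
      rw [hk1]
      constructor
      · rintro ⟨hk2, -⟩
        rw [if_neg (by omega), if_neg (by omega)]
      · intro hnp
        have hk2 : ¬ 2 ≤ k := by
          intro h2
          exact hnp ⟨h2, fun p hp2 hplt _ _ => by omega⟩
        have : k = 0 ∨ k = 1 := by omega
        rcases this with rfl | rfl <;> simp
  | succ t ih =>
      intro hle
      have hle' : 2 + (t : Int) ≤ n := by push_cast at hle ⊢; omega
      set i : Int := 2 + (t : Int) with hidef
      have hsplit : PySem.List.pyRange 2 (2 + ((t + 1 : Nat) : Int)) 1 =
          PySem.List.pyRange 2 i 1 ++ [i] := by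
        have : (2 + ((t + 1 : Nat) : Int)) = i + 1 := by push_cast; ring
        rw [this]
        exact PySem.List.pyRange_one_succ_right (by omega)
      rw [hsplit, List.foldl_append, List.filter_append]
      obtain ⟨⟨hlen, hval⟩, hem⟩ := ih hle'
      set st := (PySem.List.pyRange 2 i 1).foldl (pvStepA n)
        (((Array.replicate n.toNat (1 : Int)).setIfInBounds 0 0).setIfInBounds 1 0, [])
        with hst
      have hi2 : (2:Int) ≤ i := by omega
      have hiln : i < n := by omega
      have hcond : st.1.getD i.toNat 0 = 1 ↔ Nat.Prime i.toNat := by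
        constructor
        · intro h1
          by_contra hnp
          rw [(hval i (by omega) hiln).2
            (fun hc => hnp ((predA_self i hi2).mp hc.2))] at h1
          exact absurd h1 (by norm_num)
        · intro hp
          exact (hval i (by omega) hiln).1 ⟨hi2, (predA_self i hi2).mpr hp⟩
      have hrevQ : (pvIsPrime (pvRevA i 0) = 1) ↔ Nat.Prime (pvRevB i 0).toNat := by
        rw [pvRevA_eq_pvRevB i (by omega) 0]
        exact pvIsPrime_eq_one_iff _ (pvRevB_nonneg i 0 le_rfl)
      rw [List.foldl_cons, List.foldl_nil]
      by_cases hp : Nat.Prime i.toNat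
      · -- i is prime: sieve is marked, i is appended iff its reversal is prime
        have hfi : List.filter pvQ [i] = if pvIsPrime (pvRevA i 0) = 1 then [i] else [] := by
          by_cases hrev : Nat.Prime (pvRevB i 0).toNat
          · rw [if_pos (hrevQ.mpr hrev)]
            simp [pvQ, hp, hrev]
          · rw [if_neg (fun h => hrev (hrevQ.mp h))]
            simp [pvQ, hrev]
        unfold pvStepA
        rw [if_pos (hcond.mpr hp)]
        dsimp only
        refine ⟨⟨?_, ?_⟩, ?_⟩
        · rw [pvMark_length, hlen]
        · intro k hk0 hkn
          have MG := pvMark_get n i hi2 2 (by norm_num) st.1 hlen k hk0 hkn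
          constructor
          · rintro ⟨hk2, hpk⟩
            have hnm : ¬(i ∣ k ∧ i * 2 ≤ k) := by
              rintro ⟨hdvd, hle2⟩
              have := hpk i hi2 (by omega) hp hdvd
              have h2i : i * 2 = i + i := by ring
              omega
            rw [MG.2 hnm]
            refine (hval k hk0 hkn).1 ⟨hk2, fun p hp2 hplt hppr hpd => hpk p hp2 (by omega) hppr hpd⟩
          · intro hn'
            by_cases hM : i ∣ k ∧ i * 2 ≤ k
            · exact MG.1 hM
            · rw [MG.2 hM]
              refine (hval k hk0 hkn).2 ?_
              rintro ⟨hk2, hpk⟩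
              refine hn' ⟨hk2, fun p hp2 hplt hppr hpd => ?_⟩
              rcases lt_or_eq_of_le (by omega : p ≤ i) with hlt | rfl
              · exact hpk p hp2 hlt hppr hpd
              · -- p = i : since k is not a marked multiple, k = i
                obtain ⟨c, rfl⟩ := hpd
                have hc1 : 1 ≤ c := by nlinarith
                have hc2 : c < 2 := by
                  by_contra hc2
                  exact hM ⟨Dvd.intro c rfl, by nlinarith⟩
                have : c = 1 := by omega
                rw [this, mul_one]
        · rw [hem, hfi]
          split_ifs <;> simp
      · -- i is not prime: nothing changes
        have hfi : List.filter pvQ [i] = [] := by simp [pvQ, hp]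
        unfold pvStepA
        rw [if_neg (fun h => hp (hcond.mp h))]
        refine ⟨⟨hlen, ?_⟩, by rw [hem, hfi, List.append_nil]⟩
        intro k hk0 hkn
        constructor
        · rintro ⟨hk2, hpk⟩
          exact (hval k hk0 hkn).1
            ⟨hk2, fun p hp2 hplt hppr hpd => hpk p hp2 (by omega) hppr hpd⟩
        · intro hn'
          refine (hval k hk0 hkn).2 ?_
          rintro ⟨hk2, hpk⟩
          refine hn' ⟨hk2, fun p hp2 hplt hppr hpd => ?_⟩
          rcases lt_or_eq_of_le (by omega : p ≤ i) with hlt | rfl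
          · exact hpk p hp2 hlt hppr hpd
          · exact absurd hppr hp

theorem emirpNumber_eq_filter (n : Int) (hn : 2 ≤ n) :
    emirpNumber n = (PySem.List.pyRange 2 n 1).filter pvQ := by
  have h2t : 2 + (((n - 2).toNat : Nat) : Int) = n := by omega
  have := (foldA_inv n hn (n - 2).toNat (by omega)).2
  rw [h2t] at this
  exact this

-- ---- B's sieve ----
def predB (i k : Int) : Prop :=
  ∀ p : Int, 2 ≤ p → p < i → Nat.Prime p.toNat → p ∣ k → ¬(p * p ≤ k)

def invB (limit i : Int) (c : Array Int) : Prop :=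
  c.size = limit.toNat ∧ ∀ k : Int, 0 ≤ k → k < limit →
    ((2 ≤ k ∧ predB i k) → c.getD k.toNat 1 = 0) ∧
    (¬(2 ≤ k ∧ predB i k) → c.getD k.toNat 1 = 1)

theorem predB_self (p : Int) (hp : 2 ≤ p) : predB p p ↔ Nat.Prime p.toNat := by
  constructor
  · intro h
    by_contra hnp
    obtain ⟨q, hq2, hqp, hqd, hqq, hqlt⟩ := exists_small_prime_factor p hp hnp
    exact h q hq2 hqlt hqp hqd hqq
  · intro hpr q hq2 hqlt hqpr hqd
    have := prime_int_dvd_eq p q hp hpr hq2 hqd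
    omega

theorem predB_limit (limit k : Int) (h0 : 0 ≤ k) (hk : k < limit) :
    (2 ≤ k ∧ predB limit k) ↔ Nat.Prime k.toNat := by
  constructor
  · rintro ⟨h2, h⟩
    by_contra hnp
    obtain ⟨q, hq2, hqp, hqd, hqq, hqlt⟩ := exists_small_prime_factor k h2 hnp
    exact h q hq2 (by nlinarith) hqp hqd hqq
  · intro hp
    have h2 : 2 ≤ k := by
      have := hp.two_le; omega
    refine ⟨h2, fun p hp2 hplt hppr hpd hpp => ?_⟩
    have := prime_int_dvd_eq k p h2 hp hp2 hpd
    nlinarith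

theorem foldSet_length (ms : List Int) : ∀ c : Array Int,
    (ms.foldl (fun c m => c.setIfInBounds m.toNat 1) c).size = c.size := by
  induction ms with
  | nil => intro c; rfl
  | cons m ms ih =>
      intro c
      rw [List.foldl_cons, ih (c.setIfInBounds m.toNat 1), Array.size_setIfInBounds]

theorem foldSet_get (ms : List Int) : ∀ c : Array Int,
    (∀ m ∈ ms, 0 ≤ m ∧ m < (c.size : Int)) → ∀ k : Int, 0 ≤ k → k < (c.size : Int) →
    ((k ∈ ms) → (ms.foldl (fun c m => c.setIfInBounds m.toNat 1) c).getD k.toNat 1 = 1) ∧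
    ((k ∉ ms) → (ms.foldl (fun c m => c.setIfInBounds m.toNat 1) c).getD k.toNat 1 =
      c.getD k.toNat 1) := by
  induction ms with
  | nil =>
      intro c _ k _ _
      exact ⟨fun h => absurd h (List.not_mem_nil), fun _ => rfl⟩
  | cons m ms ih =>
      intro c hms k hk0 hkl
      rw [List.foldl_cons]
      have hlen' : (c.setIfInBounds m.toNat 1).size = c.size :=
        Array.size_setIfInBounds
      have hms' : ∀ x ∈ ms, 0 ≤ x ∧ x < ((c.setIfInBounds m.toNat 1).size : Int) := by
        intro x hx; rw [hlen']; exact hms x (List.mem_cons_of_mem m hx)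
      obtain ⟨hm0, hml⟩ := hms m List.mem_cons_self
      have IH := ih (c.setIfInBounds m.toNat 1) hms' k hk0 (by rw [hlen']; exact hkl)
      constructor
      · intro hkmem
        rcases List.mem_cons.mp hkmem with rfl | hmem
        · by_cases hin : k ∈ ms
          · exact IH.1 hin
          · rw [IH.2 hin, arrGetD_set c k k 1 1 hk0 hml hk0]; simp
        · exact IH.1 hmem
      · intro hnmem
        have hkm : k ≠ m := fun h => hnmem (h ▸ List.mem_cons_self)
        rw [IH.2 (fun h => hnmem (List.mem_cons_of_mem m h)),
          arrGetD_set c m k 1 1 hm0 hml hk0, if_neg hkm]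

theorem mem_markRange (p limit x : Int) (hp : 2 ≤ p) :
    x ∈ PySem.List.pyRange (p * p) limit p ↔ p ∣ x ∧ p * p ≤ x ∧ x < limit := by
  rw [PySem.List.mem_pyRange_iff_of_pos (by omega)]
  constructor
  · rintro ⟨h1, h2, h3⟩
    refine ⟨?_, h1, h2⟩
    have hx : x = (x - p * p) + p * p := by ring
    rw [hx]
    exact dvd_add h3 (dvd_mul_right p p)
  · rintro ⟨h1, h2, h3⟩
    exact ⟨h2, h3, dvd_sub h1 (dvd_mul_right p p)⟩

theorem foldB_inv (limit : Int) (hl : 2 ≤ limit) :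
    ∀ t : Nat, 2 + (t : Int) ≤ limit →
      invB limit (2 + (t : Int))
        ((PySem.List.pyRange 2 (2 + (t : Int)) 1).foldl (pvStepB limit)
          (((Array.replicate limit.toNat (0 : Int)).setIfInBounds 0 1).setIfInBounds 1 1)) := by
  have hlen0 : ((((Array.replicate limit.toNat (0 : Int)).setIfInBounds 0 1).setIfInBounds 1 1)).size
      = limit.toNat := by
    rw [Array.size_setIfInBounds, Array.size_setIfInBounds, Array.size_replicate]
  intro t
  induction t with
  | zero =>
      intro _
      have hnil : PySem.List.pyRange 2 (2 + ((0 : Nat) : Int)) 1 = [] :=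
        PySem.List.pyRange_one_eq_nil (by norm_num)
      rw [hnil]
      rw [show ∀ c : Array Int, List.foldl (pvStepB limit) c [] = c from fun _ => rfl]
      refine ⟨hlen0, ?_⟩
      intro k hk0 hkn
      have hk1 : ((((Array.replicate limit.toNat (0 : Int)).setIfInBounds 0 1).setIfInBounds 1 1)).getD
          k.toNat 1 =
          if k = 1 then 1 else if k = 0 then 1 else 0 := by
        rw [arrGetD_setN _ 1 k 1 1
          (by rw [Array.size_setIfInBounds, Array.size_replicate]; omega) hk0]
        simp only [Nat.cast_one]
        by_cases h1 : k = 1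
        · rw [if_pos h1, if_pos h1]
        · rw [if_neg h1, if_neg h1,
            arrGetD_setN _ 0 k 1 1 (by rw [Array.size_replicate]; omega) hk0]
          simp only [Nat.cast_zero]
          by_cases h0 : k = 0
          · rw [if_pos h0, if_pos h0]
          · rw [if_neg h0, if_neg h0,
              arrGetD_replicate limit.toNat 0 1 k hk0 (by omega)]
      rw [hk1]
      constructor
      · rintro ⟨hk2, -⟩
        rw [if_neg (by omega), if_neg (by omega)]
      · intro hnp
        have hk2 : ¬ 2 ≤ k := by
          intro h2
          exact hnp ⟨h2, fun p hp2 hplt _ _ => by omega⟩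
        have : k = 0 ∨ k = 1 := by omega
        rcases this with rfl | rfl <;> simp
  | succ t ih =>
      intro hle
      have hle' : 2 + (t : Int) ≤ limit := by push_cast at hle ⊢; omega
      set p : Int := 2 + (t : Int) with hpdef
      have hsplit : PySem.List.pyRange 2 (2 + ((t + 1 : Nat) : Int)) 1 =
          PySem.List.pyRange 2 p 1 ++ [p] := by
        have : (2 + ((t + 1 : Nat) : Int)) = p + 1 := by push_cast; ring
        rw [this]
        exact PySem.List.pyRange_one_succ_right (by omega)
      rw [hsplit, List.foldl_append, List.foldl_cons, List.foldl_nil]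
      obtain ⟨hlen, hval⟩ := ih hle'
      set comp := (PySem.List.pyRange 2 p 1).foldl (pvStepB limit)
        (((Array.replicate limit.toNat (0 : Int)).setIfInBounds 0 1).setIfInBounds 1 1)
        with hcompdef
      have hp2 : (2:Int) ≤ p := by omega
      have hpl : p < limit := by omega
      have hcond : comp.getD p.toNat 1 = 0 ↔ Nat.Prime p.toNat := by
        constructor
        · intro h0
          by_contra hnp
          rw [(hval p (by omega) hpl).2
            (fun hc => hnp ((predB_self p hp2).mp hc.2))] at h0
          exact absurd h0 (by norm_num)
        · intro hp
          exact (hval p (by omega) hpl).1 ⟨hp2, (predB_self p hp2).mpr hp⟩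
      by_cases hp : Nat.Prime p.toNat
      · -- p is prime: mark all multiples from p*p on
        unfold pvStepB
        rw [if_pos (hcond.mpr hp)]
        have hR : ∀ m ∈ PySem.List.pyRange (p * p) limit p, 0 ≤ m ∧ m < (comp.size : Int) := by
          intro m hm
          obtain ⟨hdvd, hle2, hlt⟩ := (mem_markRange p limit m hp2).mp hm
          have hpp0 : (0:Int) ≤ p * p := by nlinarith
          constructor
          · omega
          · rw [hlen]; omega
        refine ⟨?_, ?_⟩
        · rw [foldSet_length, hlen]
        · intro k hk0 hklim
          have FG := foldSet_get (PySem.List.pyRange (p * p) limit p) comp hR k hk0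
            (by rw [hlen]; omega)
          constructor
          · rintro ⟨hk2, hpk⟩
            have hkR : k ∉ PySem.List.pyRange (p * p) limit p := by
              intro hmem
              obtain ⟨hdvd, hle2, -⟩ := (mem_markRange p limit k hp2).mp hmem
              exact hpk p hp2 (by omega) hp hdvd hle2
            rw [FG.2 hkR]
            exact (hval k hk0 hklim).1
              ⟨hk2, fun q hq2 hqlt hqpr hqd => hpk q hq2 (by omega) hqpr hqd⟩
          · intro hn'
            by_cases hkR : k ∈ PySem.List.pyRange (p * p) limit p
            · exact FG.1 hkR
            · rw [FG.2 hkR]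
              refine (hval k hk0 hklim).2 ?_
              rintro ⟨hk2, hpk⟩
              refine hn' ⟨hk2, fun q hq2 hqlt hqpr hqd hqq => ?_⟩
              rcases lt_or_eq_of_le (by omega : q ≤ p) with hlt | rfl
              · exact hpk q hq2 hlt hqpr hqd hqq
              · exact hkR ((mem_markRange p limit k hp2).mpr ⟨hqd, hqq, hklim⟩)
      · -- p is not prime: nothing changes
        unfold pvStepB
        rw [if_neg (fun h => hp (hcond.mp h))]
        refine ⟨hlen, ?_⟩
        intro k hk0 hklim
        constructor
        · rintro ⟨hk2, hpk⟩
          exact (hval k hk0 hklim).1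
            ⟨hk2, fun q hq2 hqlt hqpr hqd => hpk q hq2 (by omega) hqpr hqd⟩
        · intro hn'
          refine (hval k hk0 hklim).2 ?_
          rintro ⟨hk2, hpk⟩
          refine hn' ⟨hk2, fun q hq2 hqlt hqpr hqd hqq => ?_⟩
          rcases lt_or_eq_of_le (by omega : q ≤ p) with hlt | rfl
          · exact hpk q hq2 hlt hqpr hqd hqq
          · exact absurd hqpr hp

theorem emirpNumber_alt_eq_filter (n : Int) :
    emirpNumber_alt n = (PySem.List.pyRange 2 n 1).filter pvQ := by
  obtain ⟨d, hld, hnle⟩ := pvLimit_spec n 10 (by norm_num)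
  have h1d : (1:Int) ≤ 10 ^ d := one_le_pow₀ (by norm_num)
  have hl2 : 2 ≤ pvLimit 10 n := by rw [hld]; nlinarith
  have hpow : pvLimit 10 n = 10 ^ (d + 1) := by rw [hld]; ring
  have hinv := foldB_inv (pvLimit 10 n) hl2 (pvLimit 10 n - 2).toNat (by omega)
  rw [show (2 + (((pvLimit 10 n - 2).toNat : Nat) : Int)) = pvLimit 10 n by omega] at hinv
  obtain ⟨hlen, hval⟩ := hinv
  set comp := (PySem.List.pyRange 2 (pvLimit 10 n) 1).foldl (pvStepB (pvLimit 10 n))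
    (((Array.replicate (pvLimit 10 n).toNat (0 : Int)).setIfInBounds 0 1).setIfInBounds 1 1)
    with hcompdef
  have hcomp : ∀ k : Int, 0 ≤ k → k < pvLimit 10 n →
      (comp.getD k.toNat 1 = 0 ↔ Nat.Prime k.toNat) := by
    intro k hk0 hkl
    constructor
    · intro h0
      by_contra hnp
      rw [(hval k hk0 hkl).2 (fun hc => hnp ((predB_limit _ k hk0 hkl).mp hc))] at h0
      exact absurd h0 (by norm_num)
    · intro hp
      exact (hval k hk0 hkl).1 ((predB_limit _ k hk0 hkl).mpr hp)
  show (PySem.List.pyRange 2 n 1).foldl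
      (fun res i =>
        if comp.getD i.toNat 1 = 0 then
          (if comp.getD (pvRevB i 0).toNat 1 = 0 then res ++ [i] else res)
        else res) [] = (PySem.List.pyRange 2 n 1).filter pvQ
  rw [PySem.List.foldl_congr_mem (PySem.List.pyRange 2 n 1) _
    (fun res i => if pvQ i = true then res ++ [i] else res) [] ?_]
  · exact PySem.List.foldl_append_if_eq_filter pvQ (PySem.List.pyRange 2 n 1) []
  · intro res i hi
    dsimp only
    obtain ⟨hi2, hin⟩ := PySem.List.mem_pyRange_one.mp hi
    have hiQ := hcomp i (by omega) (by omega)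
    have hr0 : 0 ≤ pvRevB i 0 := pvRevB_nonneg i 0 le_rfl
    have hrlt : pvRevB i 0 < pvLimit 10 n := by
      rw [hpow]
      have := pvRevB_lt (d + 1) i 0 1 (by omega) (by rw [hpow] at hnle; omega)
        le_rfl (by norm_num)
      simpa using this
    have hrQ := hcomp (pvRevB i 0) hr0 hrlt
    by_cases hpi : Nat.Prime i.toNat
    · by_cases hpr : Nat.Prime (pvRevB i 0).toNat
      · rw [if_pos (hiQ.mpr hpi), if_pos (hrQ.mpr hpr),
          if_pos (by simp [pvQ, hpi, hpr])]
      · rw [if_pos (hiQ.mpr hpi), if_neg (fun h => hpr (hrQ.mp h)),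
          if_neg (by simp [pvQ, hpr])]
    · rw [if_neg (fun h => hpi (hiQ.mp h)), if_neg (by simp [pvQ, hpi])]

-- ===== VERDICT (by name: the statement is the Claim_ definition above) =====
theorem emirpNumber_spec : Claim_equal_emirpNumber := by
  intro n _ hpre
  unfold Spec_emirpNumber
  rw [emirpNumber_eq_filter n hpre, emirpNumber_alt_eq_filter n]
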